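-- pv_equiv track=rewrite | github.com/Egor-Kozh/Olymp | Тау-Кита/main.py | Slovo
-- ===== SOURCE A (Python) =====
-- def Slovo(slovo):
--     slovo2 = ""
--     i = int(len(slovo) / 2)
--     j = 0
--     while j != len(slovo):
--         letter = slovo[i]
--         slovo2 = slovo2 + letter
--         j = j + 1
--         i = i + j * ((-1) ** j)
--     return slovo2
-- ===== SOURCE B (Python) =====
-- def Slovo(slovo):
--     if not slovo:
--         return ""
--     m = len(slovo) // 2
--     left = slovo[:m][::-1]      # characters left of the center, nearest first
--     right = slovo[m + 1:]       # characters right of the center, nearest first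
--     out = [slovo[m]]
--     for a, b in zip(left, right):
--         out.append(a)
--         out.append(b)
--     out.extend(left[len(right):])   # even length leaves one extra left char
--     return "".join(out)
-- ===== Notes on version B (the rewrite author's own statement) =====
-- stated objective: alternative
-- what changed: B computes nothing index-by-index: it slices the string into the reversed left half and the right half, interleaves the two slices pairwise with zip, appends the possible leftover left character, joining once, instead of A's i += j*(-1)**j index walk with repeated string concatenation.
import Mathlib
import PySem

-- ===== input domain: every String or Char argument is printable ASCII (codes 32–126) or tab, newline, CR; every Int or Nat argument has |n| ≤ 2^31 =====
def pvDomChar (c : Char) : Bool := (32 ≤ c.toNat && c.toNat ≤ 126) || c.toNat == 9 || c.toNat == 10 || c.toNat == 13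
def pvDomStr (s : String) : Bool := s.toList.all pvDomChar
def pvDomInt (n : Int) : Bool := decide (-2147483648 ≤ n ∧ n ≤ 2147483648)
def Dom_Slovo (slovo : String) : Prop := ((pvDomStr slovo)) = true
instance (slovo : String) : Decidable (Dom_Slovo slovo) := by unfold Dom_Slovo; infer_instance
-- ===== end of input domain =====

-- B slices the string into its two halves and interleaves them (with one join), instead of A's single
-- index-walk i += j*(-1)**j with repeated string concatenation; return value is identical.

-- ===== PORT A =====
-- while j != len(slovo): take slovo[i]; j += 1; i += j*(-1)**j.  Fuel = len - j (j only increments).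
-- slovo[i] never goes out of range; the unreachable none case of pyGet? returns ' '.
def SlovoLoopA (s : List Char) : Nat → Int → Nat → List Char → List Char
  | 0, _, _, acc => acc
  | k+1, i, j, acc =>
      let letter := (PySem.List.pyGet? s i).getD ' '
      SlovoLoopA s k (i + ((j : Int) + 1) * (-1)^(j+1)) (j+1) (acc ++ [letter])

def Slovo (slovo : String) : String :=
  String.mk (SlovoLoopA slovo.toList slovo.toList.length
    ((slovo.toList.length / 2 : Nat) : Int) 0 [])

-- ===== PORT B =====
-- for a, b in zip(left, right): out.append(a); out.append(b)
def SlovoInterleave : List (Char × Char) → List Char → List Char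
  | [], out => out
  | p :: ps, out => SlovoInterleave ps (out ++ [p.1, p.2])

-- slovo[:m][::-1] → (slice _ none m).reverse ; slovo[m+1:] → slice _ (m+1) none ; slovo[m] → pyGet?
def Slovo_alt (slovo : String) : String :=
  let s := slovo.toList
  if s.length = 0 then "" else
    let m := s.length / 2
    let left := (PySem.List.slice s none (some (m : Int))).reverse
    let right := PySem.List.slice s (some ((m : Int) + 1)) none
    let out := SlovoInterleave (left.zip right) [(PySem.List.pyGet? s (m : Int)).getD ' ']
    String.mk (out ++ left.drop right.length)

-- ===== PRECONDITION & SPEC =====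
def Spec_Slovo (slovo : String) (out : String) : Prop := out = Slovo_alt slovo
instance (slovo : String) (out : String) : Decidable (Spec_Slovo slovo out) := by unfold Spec_Slovo; infer_instance

-- ===== CLAIM (what is proved, stated in full; the proofs are below) =====
def Claim_equal_Slovo : Prop := ∀ (slovo : String), Dom_Slovo slovo → Spec_Slovo slovo (Slovo slovo)

-- ===== LEMMAS AND PROOFS =====

-- the index A visits at step j (center-out zig-zag)
def SlovoIdx (m j : Nat) : Int := (m : Int) + (-1)^j * (((j+1)/2 : Nat) : Int)

-- the character produced at step j
def SlovoCh (s : List Char) (m j : Nat) : Char := (PySem.List.pyGet? s (SlovoIdx m j)).getD ' '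

theorem SlovoIdx_zero (m : Nat) : SlovoIdx m 0 = (m : Int) := by
  simp [SlovoIdx]

theorem SlovoIdx_succ (m j : Nat) :
    SlovoIdx m j + ((j : Int) + 1) * (-1)^(j+1) = SlovoIdx m (j+1) := by
  rcases Nat.even_or_odd j with ⟨t, ht⟩ | ⟨t, ht⟩
  · subst ht
    have h1 : ((-1 : Int))^(t+t) = 1 := Even.neg_one_pow ⟨t, rfl⟩
    have h2 : ((-1 : Int))^(t+t+1) = -1 := Odd.neg_one_pow ⟨t, by ring⟩
    have h3 : (t+t+1)/2 = t := by omega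
    have h4 : (t+t+2)/2 = t+1 := by omega
    simp only [SlovoIdx, h1, h2, h3, h4]
    push_cast
    ring
  · subst ht
    have h1 : ((-1 : Int))^(2*t+1) = -1 := Odd.neg_one_pow ⟨t, by ring⟩
    have h2 : ((-1 : Int))^(2*t+1+1) = 1 := Even.neg_one_pow ⟨t+1, by ring⟩
    have h3 : (2*t+1+1)/2 = t+1 := by omega
    have h4 : (2*t+1+2)/2 = t+1 := by omega
    simp only [SlovoIdx, h1, h2, h3, h4]
    push_cast
    ring

theorem SlovoIdx_left (m d : Nat) (hd : 1 ≤ d) :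
    SlovoIdx m (2*d-1) = (m : Int) - (d : Int) := by
  have hpow : ((-1 : Int))^(2*d-1) = -1 := Odd.neg_one_pow ⟨d-1, by omega⟩
  have hdiv : (2*d-1+1)/2 = d := by omega
  simp only [SlovoIdx, hpow, hdiv]
  ring

theorem SlovoIdx_right (m d : Nat) :
    SlovoIdx m (2*d) = (m : Int) + (d : Int) := by
  have hpow : ((-1 : Int))^(2*d) = 1 := Even.neg_one_pow ⟨d, by ring⟩
  have hdiv : (2*d+1)/2 = d := by omega
  simp only [SlovoIdx, hpow, hdiv]
  ring

theorem SlovoLoopA_eq (s : List Char) (m : Nat) :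
    ∀ (k j : Nat) (acc : List Char),
      SlovoLoopA s k (SlovoIdx m j) j acc
        = acc ++ (List.range k).map (fun t => SlovoCh s m (j+t)) := by
  intro k
  induction k with
  | zero => intro j acc; simp [SlovoLoopA]
  | succ k ih =>
      intro j acc
      rw [SlovoLoopA, SlovoIdx_succ, ih (j+1)]
      simp only [List.range_succ_eq_map, List.map_cons, List.map_map]
      simp only [List.append_assoc, List.cons_append, List.nil_append, SlovoCh]
      congr 1
      simp
      intro a _
      have h : j + 1 + a = j + (a + 1) := by omega
      rw [h]

theorem Slovo_eq_canon (slovo : String) :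
    Slovo slovo
      = String.mk ((List.range slovo.toList.length).map (SlovoCh slovo.toList (slovo.toList.length / 2))) := by
  simp only [Slovo]
  have h0 : ((slovo.toList.length / 2 : Nat) : Int)
      = SlovoIdx (slovo.toList.length / 2) 0 := (SlovoIdx_zero _).symm
  rw [h0, SlovoLoopA_eq]
  simp

-- [f j, f (j+1)] prefix of a shifted range-map
theorem range_map_shift2 (f : Nat → Char) (j n : Nat) :
    (List.range (n+2)).map (fun t => f (j + t))
      = f j :: f (j+1) :: (List.range n).map (fun t => f (j + 2 + t)) := by
  have : n + 2 = (n+1) + 1 := rfl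
  rw [this, List.range_succ_eq_map, List.range_succ_eq_map]
  simp only [List.map_cons, List.map_map]
  refine congrArg₂ _ (by simp) (congrArg₂ _ (by simp) ?_)
  apply List.map_congr_left
  intro a _
  simp only [Function.comp]
  congr 1
  omega

theorem SlovoInterleave_eq (f : Nat → Char) :
    ∀ (L R : List Char) (j : Nat) (acc : List Char),
      (∀ k (h : k < L.length), L[k] = f (j + 2*k)) →
      (∀ k (h : k < R.length), R[k] = f (j + 1 + 2*k)) →
      R.length ≤ L.length → L.length ≤ R.length + 1 →
      SlovoInterleave (L.zip R) acc ++ L.drop R.length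
        = acc ++ (List.range (L.length + R.length)).map (fun t => f (j + t)) := by
  intro L
  induction L with
  | nil =>
      intro R j acc _ _ hRL _
      have : R = [] := List.eq_nil_of_length_eq_zero (by simpa using hRL)
      subst this
      simp [SlovoInterleave]
  | cons a L ih =>
      intro R j acc hL hR hRL hLR
      cases R with
      | nil =>
          have : L = [] := by cases L with | nil => rfl | cons c Lc => simp at hLR
          subst this
          have ha : a = f j := by simpa using hL 0 (by simp)
          simp [SlovoInterleave, ha]
      | cons b R =>
          have ha : a = f j := by simpa using hL 0 (by simp)
          have hb : b = f (j+1) := by simpa using hR 0 (by simp)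
          have hL' : ∀ k (h : k < L.length), L[k] = f ((j+2) + 2*k) := by
            intro k hk
            have := hL (k+1) (by simpa using Nat.succ_lt_succ hk)
            simpa [show j + 2*(k+1) = j + 2 + 2*k by omega] using this
          have hR' : ∀ k (h : k < R.length), R[k] = f ((j+2) + 1 + 2*k) := by
            intro k hk
            have := hR (k+1) (by simpa using Nat.succ_lt_succ hk)
            simpa [show j + 1 + 2*(k+1) = j + 2 + 1 + 2*k by omega] using this
          have := ih R (j+2) (acc ++ [a, b]) hL' hR' (by simp at hRL ⊢; omega) (by simp at hLR ⊢; omega)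
          simp only [List.zip_cons_cons, SlovoInterleave, List.length_cons, List.drop_succ_cons] at this ⊢
          rw [this]
          have hlen : (a :: L).length + (b :: R).length = (L.length + R.length) + 2 := by
            simp; omega
          have hlen2 : L.length + 1 + (R.length + 1) = L.length + R.length + 2 := by omega
          rw [hlen2, range_map_shift2, ha, hb]
          simp

theorem Slovo_alt_eq_canon (slovo : String) :
    Slovo_alt slovo
      = String.mk ((List.range slovo.toList.length).map (SlovoCh slovo.toList (slovo.toList.length / 2))) := by
  simp only [Slovo_alt]
  set s := slovo.toList with hs
  by_cases hn : s.length = 0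
  · rw [if_pos hn, hn]; rfl
  · rw [if_neg hn]
    set n := s.length with hnn
    set m := n / 2 with hm
    have hmn : m < n := by omega
    have hleft : PySem.List.slice s none (some (m : Int)) = s.take m :=
      PySem.List.slice_to_natCast s m
    have hright : PySem.List.slice s (some ((m : Int) + 1)) none = s.drop (m+1) := by
      have h1 : ((m : Int) + 1) = ((m + 1 : Nat) : Int) := by push_cast; ring
      rw [h1, PySem.List.slice_from_natCast]
    rw [hleft, hright]
    have hLlen : ((s.take m).reverse).length = m := by simp; omega
    have hRlen : (s.drop (m+1)).length = n - (m+1) := by simp; omega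
    have hL : ∀ k (h : k < ((s.take m).reverse).length),
        ((s.take m).reverse)[k] = SlovoCh s m (1 + 2*k) := by
      intro k hk
      rw [hLlen] at hk
      have hk' : m - 1 - k < s.length := by omega
      have hget : ((s.take m).reverse)[k]'(by simpa [hLlen]) = s[m-1-k]'hk' := by
        rw [List.getElem_reverse]
        rw [List.getElem_take]
        congr 1
        simp
        omega
      rw [hget, SlovoCh]
      have hidx : SlovoIdx m (1 + 2*k) = (m : Int) - ((k+1 : Nat) : Int) := by
        have : 1 + 2*k = 2*(k+1) - 1 := by omega
        rw [this, SlovoIdx_left m (k+1) (by omega)]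
      rw [hidx]
      have h0 : (0 : Int) ≤ (m : Int) - ((k+1 : Nat) : Int) := by push_cast; omega
      have h1 : (m : Int) - ((k+1 : Nat) : Int) < s.length := by push_cast; omega
      rw [PySem.List.pyGet?_eq_some_getElem s h0 h1]
      simp only [Option.getD_some]
      congr 1
      omega
    have hR : ∀ k (h : k < (s.drop (m+1)).length),
        (s.drop (m+1))[k] = SlovoCh s m (1 + 1 + 2*k) := by
      intro k hk
      rw [hRlen] at hk
      rw [List.getElem_drop, SlovoCh]
      have hidx : SlovoIdx m (1 + 1 + 2*k) = (m : Int) + ((k+1 : Nat) : Int) := by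
        have : 1 + 1 + 2*k = 2*(k+1) := by omega
        rw [this, SlovoIdx_right m (k+1)]
      rw [hidx]
      have h0 : (0 : Int) ≤ (m : Int) + ((k+1 : Nat) : Int) := by positivity
      have h1 : (m : Int) + ((k+1 : Nat) : Int) < s.length := by push_cast; omega
      rw [PySem.List.pyGet?_eq_some_getElem s h0 h1]
      simp only [Option.getD_some]
      congr 1
      omega
    have hmain := SlovoInterleave_eq (SlovoCh s m) ((s.take m).reverse) (s.drop (m+1)) 1
      [(PySem.List.pyGet? s (m : Int)).getD ' '] hL hR
      (by rw [hLlen, hRlen]; omega) (by rw [hLlen, hRlen]; omega)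
    rw [hLlen] at hmain
    rw [hRlen] at hmain ⊢
    simp only [hmain]
    congr 1
    have hacc : (PySem.List.pyGet? s (m : Int)).getD ' ' = SlovoCh s m 0 := by
      rw [SlovoCh, SlovoIdx_zero]
    rw [hacc]
    have hnsplit : n = (m + (n - (m+1))) + 1 := by omega
    conv_rhs => rw [hnsplit, List.range_succ_eq_map]
    simp only [List.map_cons, List.map_map, List.singleton_append]
    congr 1
    apply List.map_congr_left
    intro a _
    simp only [Function.comp]
    congr 1
    omega

-- ===== VERDICT (by name: the statement is the Claim_ definition above) =====
theorem Slovo_spec : Claim_equal_Slovo := by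
  intro slovo _
  unfold Spec_Slovo
  rw [Slovo_eq_canon, Slovo_alt_eq_canon]
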